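-- pv_equiv track=rewrite | github.com/rahulverman121/cns1 | lab/celebrity.py | find_celeb
-- ===== SOURCE A (Python) =====
-- def find_celeb(people,possible):
--   result = []
--   for p in possible:
--     celeb = False
--     for r in range(0,len(people)):
--       if r != p:
--         for k in people[r]:
--           if (ord(k) - 48) == p:
--             celeb = True
--             result.append(p)
--   if len(result) == len(people) - 1:
--     return result[0]
--   else:
--     return -1
-- ===== SOURCE B (Python) =====
-- def find_celeb(people, possible):
--     # One pass over all characters builds per-row and global code counters,
--     # then each candidate is decided in O(1).
--     rows = []
--     tot = {}
--     for s in people: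
--         d = {}
--         for k in s:
--             v = ord(k) - 48
--             d[v] = d.get(v, 0) + 1
--             tot[v] = tot.get(v, 0) + 1
--         rows.append(d)
--     total = 0
--     first = None
--     for p in possible:
--         c = tot.get(p, 0)
--         if 0 <= p < len(people):
--             c -= rows[p].get(p, 0)
--         if c > 0:
--             total += c
--             if first is None:
--                 first = p
--     if total == len(people) - 1 and first is not None:
--         return first
--     return -1
-- ===== Notes on version B (the rewrite author's own statement) =====
-- stated objective: faster
-- what changed: A rescans every row's characters for each candidate; B makes one pass over all characters building per-row and global code counters (dicts), then decides each candidate with O(1) lookups.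
-- crash fix: When people has exactly one row and no candidate p in possible is nonzero with a character of code p+48 in that row, A evaluates result[0] on an empty list and raises IndexError; B returns -1. — e.g. on find_celeb(["a"], [5]): A raises IndexError, B returns -1
import Mathlib
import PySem

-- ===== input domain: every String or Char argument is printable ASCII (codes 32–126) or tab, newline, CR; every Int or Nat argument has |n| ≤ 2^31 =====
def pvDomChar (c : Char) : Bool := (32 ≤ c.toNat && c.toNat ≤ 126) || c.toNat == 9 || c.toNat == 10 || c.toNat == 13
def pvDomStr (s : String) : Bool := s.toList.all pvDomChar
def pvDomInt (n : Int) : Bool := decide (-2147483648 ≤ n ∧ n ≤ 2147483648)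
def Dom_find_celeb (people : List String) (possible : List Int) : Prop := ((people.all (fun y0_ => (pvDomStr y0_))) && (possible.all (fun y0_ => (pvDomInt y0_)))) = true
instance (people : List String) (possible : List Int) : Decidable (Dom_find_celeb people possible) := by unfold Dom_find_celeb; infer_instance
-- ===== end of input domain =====

-- B replaces A's per-candidate rescan of all rows by one counting pass (per-row and
-- global dict counters of character codes), deciding each candidate in O(1); the
-- timing run measured B faster on the large inputs.

-- ===== PORT A =====
def find_celeb (people : List String) (possible : List Int) : Int :=
  let result : List Int := possible.foldl (fun result p =>
    (PySem.List.pyRange 0 (people.length : Int) 1).foldl (fun result r =>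
      if r ≠ p then
        (PySem.List.pyGetD people r "").toList.foldl (fun result k =>
          if ((k.toNat : Int) - 48) = p then result ++ [p] else result) result
      else result) result) []
  if (result.length : Int) = (people.length : Int) - 1 then
    (PySem.List.pyGet? result 0).getD 0   -- result[0]; Pre_ guarantees result ≠ [] here
  else -1

-- ===== PORT B =====
def find_celeb_alt (people : List String) (possible : List Int) : Int :=
  -- one pass over all characters: per-row counters `rows` and a global counter `tot`
  let rt : List (PySem.Dict Int Int) × PySem.Dict Int Int :=
    people.foldl (fun acc s =>
      let dt := s.toList.foldl (fun (a : PySem.Dict Int Int × PySem.Dict Int Int) k =>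
          (a.1.insert ((k.toNat : Int) - 48) (a.1.getD ((k.toNat : Int) - 48) 0 + 1),
           a.2.insert ((k.toNat : Int) - 48) (a.2.getD ((k.toNat : Int) - 48) 0 + 1)))
        (PySem.Dict.empty, acc.2)
      (acc.1 ++ [dt.1], dt.2)) ([], PySem.Dict.empty)
  let tf : Int × Option Int := possible.foldl (fun a p =>
      let c : Int :=
        if 0 ≤ p ∧ p < (people.length : Int) then
          rt.2.getD p 0 - (PySem.List.pyGetD rt.1 p PySem.Dict.empty).getD p 0
        else rt.2.getD p 0
      if 0 < c then (a.1 + c, if a.2.isNone then some p else a.2) else a)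
    (0, none)
  if tf.1 = (people.length : Int) - 1 ∧ tf.2.isSome then tf.2.getD 0 else -1

-- ===== PRECONDITION & SPEC =====
-- Pre_ excludes exactly the inputs where A raises IndexError (result[0] on an empty
-- result): a single-row people with no nonzero candidate whose digit-shifted code
-- occurs in that row.
def Pre_find_celeb (people : List String) (possible : List Int) : Prop :=
  people.length = 1 →
    ∃ p ∈ possible, p ≠ 0 ∧ ∃ c ∈ (people.headD "").toList, (c.toNat : Int) - 48 = p
instance (people : List String) (possible : List Int) : Decidable (Pre_find_celeb people possible) := by
  unfold Pre_find_celeb; infer_instance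
def pvWitness_find_celeb : List String × List Int := (["0", "1"], [1])

-- When people has exactly one row and no candidate p in possible is nonzero with a
-- character of code p+48 in that row, A raises IndexError (result[0] on []); B returns -1.
def Raises_find_celeb (people : List String) (possible : List Int) : Prop :=
  people.length = 1 ∧
    ∀ p ∈ possible, p = 0 ∨ ∀ c ∈ (people.headD "").toList, (c.toNat : Int) - 48 ≠ p
instance (people : List String) (possible : List Int) : Decidable (Raises_find_celeb people possible) := by
  unfold Raises_find_celeb; infer_instance
def pvRaiseWitness_find_celeb : List String × List Int := (["a"], [5])
def pvRaiseWitnessOut_find_celeb : Int := -1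

def Spec_find_celeb (people : List String) (possible : List Int) (out : Int) : Prop := out = find_celeb_alt people possible
instance (people : List String) (possible : List Int) (out : Int) : Decidable (Spec_find_celeb people possible out) := by unfold Spec_find_celeb; infer_instance

-- ===== CLAIM (what is proved, stated in full; the proofs are below) =====
def Claim_equal_find_celeb : Prop := ∀ (people : List String) (possible : List Int), Dom_find_celeb people possible → Pre_find_celeb people possible → Spec_find_celeb people possible (find_celeb people possible)
def Claim_raises_find_celeb : Prop := (∀ (people : List String) (possible : List Int), Dom_find_celeb people possible → Raises_find_celeb people possible → ¬ Pre_find_celeb people possible) ∧ (Dom_find_celeb (pvRaiseWitness_find_celeb.1) (pvRaiseWitness_find_celeb.2) ∧ Raises_find_celeb (pvRaiseWitness_find_celeb.1) (pvRaiseWitness_find_celeb.2) ∧ find_celeb_alt (pvRaiseWitness_find_celeb.1) (pvRaiseWitness_find_celeb.2) = pvRaiseWitnessOut_find_celeb)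

-- ===== LEMMAS AND PROOFS =====

-- code of a character, and the number of its occurrences in a row
def pvCode (k : Char) : Int := (k.toNat : Int) - 48
def pvCnt (s : String) (p : Int) : Nat := (s.toList.map pvCode).count p
-- count over rows with index ≠ p, starting at index i
def pvCntExFrom (p : Int) : Int → List String → Nat
  | _, [] => 0
  | i, s :: rest => (if i = p then 0 else pvCnt s p) + pvCntExFrom p (i + 1) rest

theorem pvA1 (p : Int) : ∀ (l : List Char) (res : List Int),
    l.foldl (fun res k => if ((k.toNat : Int) - 48) = p then res ++ [p] else res) res
      = res ++ List.replicate ((l.map pvCode).count p) p := by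
  intro l
  induction l with
  | nil => intro res; simp
  | cons k t ih =>
    intro res
    by_cases h : pvCode k = p
    · simp only [List.foldl_cons, List.map_cons, List.count_cons]
      rw [if_pos (by simpa [pvCode] using h), ih]
      simp only [List.append_assoc, List.singleton_append]
      rw [if_pos (show (pvCode k == p) = true by simp [h]), List.replicate_succ]
    · simp only [List.foldl_cons, List.map_cons, List.count_cons]
      rw [if_neg (by simpa [pvCode] using h), ih]
      simp [h]

theorem pvA2 (p : Int) : ∀ (xs : List String) (i : Int) (res : List Int),
    (PySem.List.enumerate xs i).foldl (fun res js =>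
        if js.1 ≠ p then res ++ List.replicate (pvCnt js.2 p) p else res) res
      = res ++ List.replicate (pvCntExFrom p i xs) p := by
  intro xs
  induction xs with
  | nil => intro i res; simp [PySem.List.enumerate_nil, pvCntExFrom]
  | cons s t ih =>
    intro i res
    rw [PySem.List.enumerate_cons, List.foldl_cons]
    by_cases h : i = p
    · rw [if_neg (by simp [h]), ih]
      simp [pvCntExFrom, h]
    · rw [if_pos (by simp [h]), ih]
      rw [List.append_assoc, ← List.replicate_add]
      simp [pvCntExFrom, h]

-- A's accumulated result list, in closed form
theorem pvA3 (people : List String) (possible : List Int) :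
    (possible.foldl (fun result p =>
      (PySem.List.pyRange 0 (people.length : Int) 1).foldl (fun result r =>
        if r ≠ p then
          (PySem.List.pyGetD people r "").toList.foldl (fun result k =>
            if ((k.toNat : Int) - 48) = p then result ++ [p] else result) result
        else result) result) [])
    = possible.flatMap (fun p => List.replicate (pvCntExFrom p 0 people) p) := by
  have hbody : ∀ (res : List Int) (p : Int),
      (PySem.List.pyRange 0 (people.length : Int) 1).foldl (fun res r =>
        if r ≠ p then
          (PySem.List.pyGetD people r "").toList.foldl (fun res k =>
            if ((k.toNat : Int) - 48) = p then res ++ [p] else res) res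
        else res) res = res ++ List.replicate (pvCntExFrom p 0 people) p := by
    intro res p
    have henum := PySem.List.enumerate_eq_map_pyRange (xs := people) (d := "")
    calc (PySem.List.pyRange 0 (people.length : Int) 1).foldl (fun res r =>
        if r ≠ p then
          (PySem.List.pyGetD people r "").toList.foldl (fun res k =>
            if ((k.toNat : Int) - 48) = p then res ++ [p] else res) res
        else res) res
        = (PySem.List.enumerate people 0).foldl (fun res js =>
            if js.1 ≠ p then
              (js.2.toList.foldl (fun res k =>
                if ((k.toNat : Int) - 48) = p then res ++ [p] else res) res)
            else res) res := by
          rw [henum, List.foldl_map]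
          rfl
      _ = (PySem.List.enumerate people 0).foldl (fun res js =>
            if js.1 ≠ p then res ++ List.replicate (pvCnt js.2 p) p else res) res := by
          simp only [pvA1, pvCnt]
      _ = res ++ List.replicate (pvCntExFrom p 0 people) p := pvA2 p people 0 res
  calc (possible.foldl (fun result p =>
      (PySem.List.pyRange 0 (people.length : Int) 1).foldl (fun result r =>
        if r ≠ p then
          (PySem.List.pyGetD people r "").toList.foldl (fun result k =>
            if ((k.toNat : Int) - 48) = p then result ++ [p] else result) result
        else result) result) [])
      = possible.foldl (fun result p =>
          result ++ List.replicate (pvCntExFrom p 0 people) p) [] := by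
        simp only [hbody]
    _ = possible.flatMap (fun p => List.replicate (pvCntExFrom p 0 people) p) := by
        simpa using PySem.List.foldl_append_eq_flatMap
          (g := fun p => List.replicate (pvCntExFrom p 0 people) p) (l := possible) (acc := [])

-- head of the flatMap of replicates = first candidate with a nonzero count
theorem pvHead (g : Int → Nat) : ∀ (l : List Int),
    (l.flatMap (fun p => List.replicate (g p) p)).head?
      = l.find? (fun p => g p ≠ 0) := by
  intro l
  induction l with
  | nil => simp
  | cons p t ih =>
    by_cases h : g p = 0
    · simp [List.flatMap_cons, h, ih]
    · obtain ⟨n, hn⟩ : ∃ n, g p = n + 1 := ⟨g p - 1, by omega⟩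
      simp [List.flatMap_cons, hn, List.replicate_succ]

-- the row-counter dict of a row
theorem pvRowCnt (s : String) (p : Int) :
    ((s.toList.foldl (fun d k =>
        d.insert ((k.toNat : Int) - 48) (d.getD ((k.toNat : Int) - 48) 0 + 1))
      (PySem.Dict.empty : PySem.Dict Int Int)).getD p 0) = (pvCnt s p : Int) := by
  have : s.toList.foldl (fun d k =>
        d.insert ((k.toNat : Int) - 48) (d.getD ((k.toNat : Int) - 48) 0 + 1))
      (PySem.Dict.empty : PySem.Dict Int Int)
      = (s.toList.map pvCode).foldl (fun d x => d.insert x (d.getD x 0 + 1))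
          PySem.Dict.empty := by
    rw [List.foldl_map]; rfl
  rw [this, PySem.Dict.getD_foldl_insert_add_one]
  simp [pvCnt]

-- the global counter dict sums the row counts
theorem pvTotCnt (p : Int) : ∀ (xs : List String) (d : PySem.Dict Int Int),
    ((xs.foldl (fun t s => s.toList.foldl (fun d k =>
        d.insert ((k.toNat : Int) - 48) (d.getD ((k.toNat : Int) - 48) 0 + 1)) t) d).getD p 0)
      = d.getD p 0 + ((xs.map (fun s => pvCnt s p)).sum : Int) := by
  intro xs
  induction xs with
  | nil => intro d; simp
  | cons s t ih =>
    intro d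
    have hs : s.toList.foldl (fun d k =>
          d.insert ((k.toNat : Int) - 48) (d.getD ((k.toNat : Int) - 48) 0 + 1)) d
        = (s.toList.map pvCode).foldl (fun d x => d.insert x (d.getD x 0 + 1)) d := by
      rw [List.foldl_map]; rfl
    simp only [List.foldl_cons, ih, hs, PySem.Dict.getD_foldl_insert_add_one,
      List.map_cons, List.sum_cons]
    push_cast [pvCnt]
    ring

-- excluded count = total count minus own row's count
theorem pvE (p : Int) : ∀ (xs : List String) (i : Int), 0 ≤ i →
    (pvCntExFrom p i xs : Int)
      = ((xs.map (fun s => pvCnt s p)).sum : Int)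
        - (if i ≤ p ∧ p < i + xs.length then (pvCnt (xs.getD (p - i).toNat "") p : Int) else 0) := by
  intro xs
  induction xs with
  | nil =>
    intro i hi
    simp only [pvCntExFrom, List.map_nil, List.sum_nil, List.length_nil, Nat.cast_zero]
    rw [if_neg (by omega)]
    simp
  | cons s t ih =>
    intro i hi
    simp only [pvCntExFrom, List.map_cons, List.sum_cons, List.length_cons]
    by_cases h : i = p
    · rw [if_pos h]
      have h0 : (p - i).toNat = 0 := by omega
      rw [if_pos (by omega), h0, List.getD_cons_zero]
      have hih := ih (i + 1) (by omega)
      rw [if_neg (by omega)] at hih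
      push_cast [hih]
      ring
    · rw [if_neg h]
      have := ih (i + 1) (by omega)
      by_cases hr : i + 1 ≤ p ∧ p < i + 1 + t.length
      · rw [if_pos hr] at this
        rw [if_pos (by omega)]
        have hnat : (p - i).toNat = (p - (i + 1)).toNat + 1 := by omega
        rw [hnat]
        simp only [List.getD_cons_succ]
        push_cast [this]
        ring
      · rw [if_neg hr] at this
        rw [if_neg (by omega)]
        push_cast [this]
        ring

-- B's candidate loop in closed form
theorem pvF (g : Int → Nat) : ∀ (l : List Int) (t0 : Int) (f0 : Option Int),
    (l.foldl (fun (a : Int × Option Int) p =>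
        if 0 < ((g p : Nat) : Int) then (a.1 + (g p : Int), if a.2.isNone then some p else a.2) else a)
      (t0, f0))
    = (t0 + ((l.map (fun p => (g p : Int))).sum),
       f0.or (l.find? (fun p => g p ≠ 0))) := by
  intro l
  induction l with
  | nil => intro t0 f0; simp
  | cons p t ih =>
    intro t0 f0
    by_cases h : g p = 0
    · have hnpos : ¬ (0 : Int) < ((g p : Nat) : Int) := by simp [h]
      rw [List.foldl_cons, if_neg hnpos, ih]
      simp [h]
    · have hpos : (0 : Int) < ((g p : Nat) : Int) := by exact_mod_cast Nat.pos_of_ne_zero h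
      rw [List.foldl_cons, if_pos hpos, ih]
      have hfind : List.find? (fun p => decide (g p ≠ 0)) (p :: t) = some p := by
        simp [h]
      rw [hfind, List.map_cons, List.sum_cons, Prod.mk.injEq]
      constructor
      · ring
      · cases f0 <;> simp

-- B in closed form
theorem pvBclosed (people : List String) (possible : List Int) :
    find_celeb_alt people possible
      = (if ((possible.map (fun p => (pvCntExFrom p 0 people : Int))).sum)
              = (people.length : Int) - 1
            ∧ (possible.find? (fun p => pvCntExFrom p 0 people ≠ 0)).isSome
          then (possible.find? (fun p => pvCntExFrom p 0 people ≠ 0)).getD 0 else -1) := by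
  unfold find_celeb_alt
  -- split the paired character fold into its two components
  have hsplit : ∀ (s : String) (a : List (PySem.Dict Int Int) × PySem.Dict Int Int),
      (s.toList.foldl (fun (a : PySem.Dict Int Int × PySem.Dict Int Int) k =>
          (a.1.insert ((k.toNat : Int) - 48) (a.1.getD ((k.toNat : Int) - 48) 0 + 1),
           a.2.insert ((k.toNat : Int) - 48) (a.2.getD ((k.toNat : Int) - 48) 0 + 1)))
        (PySem.Dict.empty, a.2))
      = (s.toList.foldl (fun d k =>
            d.insert ((k.toNat : Int) - 48) (d.getD ((k.toNat : Int) - 48) 0 + 1)) PySem.Dict.empty,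
         s.toList.foldl (fun d k =>
            d.insert ((k.toNat : Int) - 48) (d.getD ((k.toNat : Int) - 48) 0 + 1)) a.2) := by
    intro s a
    exact PySem.List.foldl_prod_mk
      (f := fun (d : PySem.Dict Int Int) (k : Char) =>
        d.insert ((k.toNat : Int) - 48) (d.getD ((k.toNat : Int) - 48) 0 + 1))
      (g := fun (d : PySem.Dict Int Int) (k : Char) =>
        d.insert ((k.toNat : Int) - 48) (d.getD ((k.toNat : Int) - 48) 0 + 1))
      s.toList PySem.Dict.empty a.2
  simp only [hsplit]
  -- split the outer row fold into rows list and tot dict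
  have hout := PySem.List.foldl_prod_mk
    (f := fun (rs : List (PySem.Dict Int Int)) s => rs ++ [s.toList.foldl (fun d k =>
        d.insert ((k.toNat : Int) - 48) (d.getD ((k.toNat : Int) - 48) 0 + 1))
        (PySem.Dict.empty : PySem.Dict Int Int)])
    (g := fun (t : PySem.Dict Int Int) s => s.toList.foldl (fun d k =>
        d.insert ((k.toNat : Int) - 48) (d.getD ((k.toNat : Int) - 48) 0 + 1)) t)
    people [] PySem.Dict.empty
  rw [hout]
  -- rows is a map
  rw [PySem.List.foldl_append_singleton_eq_map]
  -- the per-candidate count equals the excluded count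
  have hc : ∀ p : Int,
      (if 0 ≤ p ∧ p < (people.length : Int) then
          (people.foldl (fun t s => s.toList.foldl (fun d k =>
              d.insert ((k.toNat : Int) - 48) (d.getD ((k.toNat : Int) - 48) 0 + 1)) t)
            PySem.Dict.empty).getD p 0
          - (PySem.List.pyGetD
              ((List.nil : List (PySem.Dict Int Int)) ++ people.map (fun s => s.toList.foldl (fun d k =>
                  d.insert ((k.toNat : Int) - 48) (d.getD ((k.toNat : Int) - 48) 0 + 1))
                PySem.Dict.empty)) p PySem.Dict.empty).getD p 0
        else
          (people.foldl (fun t s => s.toList.foldl (fun d k =>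
              d.insert ((k.toNat : Int) - 48) (d.getD ((k.toNat : Int) - 48) 0 + 1)) t)
            PySem.Dict.empty).getD p 0)
      = (pvCntExFrom p 0 people : Int) := by
    intro p
    rw [pvTotCnt p people PySem.Dict.empty, PySem.Dict.getD_empty]
    by_cases hr : 0 ≤ p ∧ p < (people.length : Int)
    · rw [if_pos hr]
      have hlt : p.toNat < people.length := by omega
      rw [List.nil_append,
        PySem.List.pyGetD_eq_getElem _ _ hr.1 (by simpa using hr.2)]
      rw [List.getElem_map]
      rw [pvRowCnt]
      have := pvE p people 0 (le_refl 0)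
      rw [if_pos (by omega)] at this
      rw [this]
      have : people.getD (p - 0).toNat "" = people[p.toNat] := by
        rw [List.getD_eq_getElem _ _ (by omega)]
        congr 1
        omega
      rw [this]
      ring
    · rw [if_neg hr]
      have := pvE p people 0 (le_refl 0)
      rw [if_neg (by omega)] at this
      rw [this]
      ring
  -- rewrite the candidate loop body and apply pvF
  have hloop :
      (possible.foldl (fun (a : Int × Option Int) p =>
        if 0 < (if 0 ≤ p ∧ p < (people.length : Int) then
              (people.foldl (fun t s => s.toList.foldl (fun d k =>
                  d.insert ((k.toNat : Int) - 48) (d.getD ((k.toNat : Int) - 48) 0 + 1)) t)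
                PySem.Dict.empty).getD p 0
              - (PySem.List.pyGetD
                  ((List.nil : List (PySem.Dict Int Int)) ++ people.map (fun s => s.toList.foldl (fun d k =>
                      d.insert ((k.toNat : Int) - 48) (d.getD ((k.toNat : Int) - 48) 0 + 1))
                    PySem.Dict.empty)) p PySem.Dict.empty).getD p 0
            else
              (people.foldl (fun t s => s.toList.foldl (fun d k =>
                  d.insert ((k.toNat : Int) - 48) (d.getD ((k.toNat : Int) - 48) 0 + 1)) t)
                PySem.Dict.empty).getD p 0)
        then (a.1 + (if 0 ≤ p ∧ p < (people.length : Int) then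
              (people.foldl (fun t s => s.toList.foldl (fun d k =>
                  d.insert ((k.toNat : Int) - 48) (d.getD ((k.toNat : Int) - 48) 0 + 1)) t)
                PySem.Dict.empty).getD p 0
              - (PySem.List.pyGetD
                  ((List.nil : List (PySem.Dict Int Int)) ++ people.map (fun s => s.toList.foldl (fun d k =>
                      d.insert ((k.toNat : Int) - 48) (d.getD ((k.toNat : Int) - 48) 0 + 1))
                    PySem.Dict.empty)) p PySem.Dict.empty).getD p 0
            else
              (people.foldl (fun t s => s.toList.foldl (fun d k =>
                  d.insert ((k.toNat : Int) - 48) (d.getD ((k.toNat : Int) - 48) 0 + 1)) t)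
                PySem.Dict.empty).getD p 0), if a.2.isNone then some p else a.2)
        else a) ((0 : Int), (none : Option Int)))
      = ((0 : Int) + ((possible.map (fun p => (pvCntExFrom p 0 people : Int))).sum),
         (none : Option Int).or (possible.find? (fun p => pvCntExFrom p 0 people ≠ 0))) := by
    have hbody : (fun (a : Int × Option Int) p =>
        if 0 < (if 0 ≤ p ∧ p < (people.length : Int) then
              (people.foldl (fun t s => s.toList.foldl (fun d k =>
                  d.insert ((k.toNat : Int) - 48) (d.getD ((k.toNat : Int) - 48) 0 + 1)) t)
                PySem.Dict.empty).getD p 0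
              - (PySem.List.pyGetD
                  ((List.nil : List (PySem.Dict Int Int)) ++ people.map (fun s => s.toList.foldl (fun d k =>
                      d.insert ((k.toNat : Int) - 48) (d.getD ((k.toNat : Int) - 48) 0 + 1))
                    PySem.Dict.empty)) p PySem.Dict.empty).getD p 0
            else
              (people.foldl (fun t s => s.toList.foldl (fun d k =>
                  d.insert ((k.toNat : Int) - 48) (d.getD ((k.toNat : Int) - 48) 0 + 1)) t)
                PySem.Dict.empty).getD p 0)
        then (a.1 + (if 0 ≤ p ∧ p < (people.length : Int) then
              (people.foldl (fun t s => s.toList.foldl (fun d k =>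
                  d.insert ((k.toNat : Int) - 48) (d.getD ((k.toNat : Int) - 48) 0 + 1)) t)
                PySem.Dict.empty).getD p 0
              - (PySem.List.pyGetD
                  ((List.nil : List (PySem.Dict Int Int)) ++ people.map (fun s => s.toList.foldl (fun d k =>
                      d.insert ((k.toNat : Int) - 48) (d.getD ((k.toNat : Int) - 48) 0 + 1))
                    PySem.Dict.empty)) p PySem.Dict.empty).getD p 0
            else
              (people.foldl (fun t s => s.toList.foldl (fun d k =>
                  d.insert ((k.toNat : Int) - 48) (d.getD ((k.toNat : Int) - 48) 0 + 1)) t)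
                PySem.Dict.empty).getD p 0), if a.2.isNone then some p else a.2)
        else a)
        = (fun (a : Int × Option Int) p =>
            if 0 < ((pvCntExFrom p 0 people : Nat) : Int)
            then (a.1 + (pvCntExFrom p 0 people : Int), if a.2.isNone then some p else a.2) else a) := by
      funext a p
      rw [hc p]
    rw [hbody]
    exact pvF (fun p => pvCntExFrom p 0 people) possible 0 none
  simp only [hloop]
  simp [Option.or]

-- A in closed form
theorem pvAclosed (people : List String) (possible : List Int) :
    find_celeb people possible
      = (if ((possible.map (fun p => (pvCntExFrom p 0 people : Int))).sum)
              = (people.length : Int) - 1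
          then ((possible.find? (fun p => pvCntExFrom p 0 people ≠ 0)).getD 0 : Int)
          else -1)
      ∨ ((possible.find? (fun p => pvCntExFrom p 0 people ≠ 0)) = none
          ∧ people.length = 1
          ∧ find_celeb people possible = 0) := by
  unfold find_celeb
  rw [pvA3]
  have hlen : (((possible.flatMap (fun p => List.replicate (pvCntExFrom p 0 people) p)).length : Nat) : Int)
      = (possible.map (fun p => (pvCntExFrom p 0 people : Int))).sum := by
    rw [List.length_flatMap]
    rw [Nat.cast_list_sum]
    simp [List.map_map, Function.comp_def]
  by_cases hsum : ((possible.map (fun p => (pvCntExFrom p 0 people : Int))).sum)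
      = (people.length : Int) - 1
  · rw [if_pos (by rw [hlen]; exact hsum), if_pos hsum]
    cases hf : possible.find? (fun p => pvCntExFrom p 0 people ≠ 0) with
    | some q =>
      left
      have hh : (possible.flatMap (fun p => List.replicate (pvCntExFrom p 0 people) p)).head? = some q := by
        rw [pvHead]; exact hf
      rw [PySem.List.pyGet?_zero, ← List.head?_eq_getElem?, hh]
    | none =>
      -- every count is zero: the flatMap is empty
      have hempty : possible.flatMap (fun p => List.replicate (pvCntExFrom p 0 people) p) = [] := by
        have := pvHead (fun p => pvCntExFrom p 0 people) possible
        rw [hf] at this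
        exact List.head?_eq_none_iff.mp this
      right
      refine ⟨rfl, ?_, ?_⟩
      · rw [hempty] at hlen
        simp at hlen
        omega
      · rw [hempty]
        simp [PySem.List.pyGet?]
  · left
    rw [if_neg (by rw [hlen]; exact hsum), if_neg hsum]


-- a single-row people all of whose candidates have zero excluded count is exactly where A raises
theorem pvRaisesOfAllZero (people : List String) (possible : List Int)
    (hlen1 : people.length = 1)
    (hall : ∀ p ∈ possible, pvCntExFrom p 0 people = 0) :
    Raises_find_celeb people possible := by
  refine ⟨hlen1, ?_⟩
  intro p hp
  by_cases hp0 : p = 0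
  · exact Or.inl hp0
  · right
    intro c hc hcode
    obtain ⟨s, hs⟩ : ∃ s, people = [s] := by
      cases people with
      | nil => simp at hlen1
      | cons a t => cases t with
        | nil => exact ⟨a, rfl⟩
        | cons b u => simp at hlen1
    subst hs
    have h0 := hall p hp
    simp only [pvCntExFrom] at h0
    rw [if_neg (by omega)] at h0
    have hmem : p ∈ s.toList.map pvCode := by
      simp only [List.mem_map]
      exact ⟨c, by simpa using hc, by simpa [pvCode] using hcode⟩
    have := List.count_pos_iff.mpr hmem
    simp only [pvCnt] at h0
    omega

-- ===== VERDICT (by name: the statement is the Claim_ definition above) =====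
theorem find_celeb_raises : Claim_raises_find_celeb := by
  unfold Claim_raises_find_celeb
  constructor
  · intro people possible _hdom hr hpre
    obtain ⟨hlen, hall⟩ := hr
    obtain ⟨p, hp, hpne, c, hc, hcode⟩ := hpre hlen
    rcases hall p hp with h0 | hnc
    · exact hpne h0
    · exact hnc c hc hcode
  · refine ⟨by decide, ⟨rfl, ?_⟩, by rfl⟩
    intro p hp
    right
    intro c hc h
    simp [pvRaiseWitness_find_celeb] at hp hc
    subst hp; subst hc
    have h97 : ('a'.toNat : Int) = 97 := rfl
    rw [h97] at h
    omega

theorem find_celeb_spec : Claim_equal_find_celeb := by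
  intro people possible _hdom hpre
  unfold Spec_find_celeb
  rw [pvBclosed]
  rcases pvAclosed people possible with hA | ⟨hnone, hlen1, _hval⟩
  · rw [hA]
    by_cases hsum : ((possible.map (fun p => (pvCntExFrom p 0 people : Int))).sum)
        = (people.length : Int) - 1
    · cases hf : possible.find? (fun p => pvCntExFrom p 0 people ≠ 0) with
      | some q => rw [if_pos hsum, if_pos ⟨hsum, rfl⟩]
      | none =>
        -- all counts zero ⇒ sum 0 ⇒ people.length = 1 ⇒ Pre_ gives a contradiction
        exfalso
        have hall : ∀ p ∈ possible, pvCntExFrom p 0 people = 0 := by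
          intro p hp
          have := List.find?_eq_none.mp hf p hp
          simpa using this
        have hzero : ((possible.map (fun p => (pvCntExFrom p 0 people : Int))).sum) = 0 := by
          apply List.sum_eq_zero
          intro x hx
          simp only [List.mem_map] at hx
          obtain ⟨p, hp, rfl⟩ := hx
          simp [hall p hp]
        have hlen1 : people.length = 1 := by omega
        have hraises := find_celeb_raises
        unfold Claim_raises_find_celeb at hraises
        exact hraises.1 people possible _hdom
          (pvRaisesOfAllZero people possible hlen1 hall) hpre
    · rw [if_neg hsum, if_neg (by intro h; exact hsum h.1)]
  · -- A's degenerate branch: contradicts Pre_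
    exfalso
    have hall : ∀ p ∈ possible, pvCntExFrom p 0 people = 0 := by
      intro p hp
      have := List.find?_eq_none.mp hnone p hp
      simpa using this
    have hraises := find_celeb_raises
    unfold Claim_raises_find_celeb at hraises
    exact hraises.1 people possible _hdom
      (pvRaisesOfAllZero people possible hlen1 hall) hpre
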